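-- pv_equiv track=rewrite | github.com/dadosjusbr/coletores | mpba/src/crawler.py | links_perks_temporary_funds
-- ===== SOURCE A (Python) =====
-- base_url = "https://www.mpba.mp.br/sites/default/files/biblioteca/portal-transparencia/contracheque/"
--
-- cod_meses = {
--     "01": "",
--     "02": "_0",
--     "03": "_1",
--     "04": "_2",
--     "05": "_3",
--     "06": "_4",
--     "07": "_5",
--     "08": "_6",
--     "09": "_7",
--     "10": "_8",
--     "11": "_9",
--     "12": "_10",
-- }
--
-- def links_perks_temporary_funds(month, year):
--     links_type = {}
--     link = ""
--     for key in cod_meses: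
--         if key == str(month):
--             if key == "01":
--                 link = (
--                     base_url
--                     + "verbas-indenizatorias-temporarias/"
--                     + year
--                     + "/verbas_indenizatorias"
--                     + cod_meses[key]
--                     + ".ods"
--                 )
--             else:
--                 link = (
--                     base_url
--                     + "verbas-indenizatorias-temporarias/"
--                     + year
--                     + "/verbas_indenizatoria"
--                     + cod_meses[key]
--                     + ".ods"
--                 )
--
--             links_type["Membros ativos"] = link
--     return links_type
-- ===== SOURCE B (Python) =====
-- base_url = "https://www.mpba.mp.br/sites/default/files/biblioteca/portal-transparencia/contracheque/"
--
-- VALID_MONTHS = ("01", "02", "03", "04", "05", "06", "07", "08", "09", "10", "11", "12")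
--
-- def links_perks_temporary_funds(month, year):
--     s = str(month)
--     if s not in VALID_MONTHS:
--         return {}
--     v = int(s)
--     stem = "verbas_indenizatorias" if v == 1 else "verbas_indenizatoria_" + str(v - 2)
--     return {
--         "Membros ativos": base_url
--         + "verbas-indenizatorias-temporarias/"
--         + year
--         + "/"
--         + stem
--         + ".ods"
--     }
-- ===== Notes on version B (the rewrite author's own statement) =====
-- stated objective: simpler
-- what changed: Replaces the cod_meses suffix table and the scan over its keys with a single membership test on the twelve valid month strings plus a closed-form suffix computed arithmetically from int(month) ('' for month 1, '_'+str(int(month)-2) otherwise).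
import Mathlib
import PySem

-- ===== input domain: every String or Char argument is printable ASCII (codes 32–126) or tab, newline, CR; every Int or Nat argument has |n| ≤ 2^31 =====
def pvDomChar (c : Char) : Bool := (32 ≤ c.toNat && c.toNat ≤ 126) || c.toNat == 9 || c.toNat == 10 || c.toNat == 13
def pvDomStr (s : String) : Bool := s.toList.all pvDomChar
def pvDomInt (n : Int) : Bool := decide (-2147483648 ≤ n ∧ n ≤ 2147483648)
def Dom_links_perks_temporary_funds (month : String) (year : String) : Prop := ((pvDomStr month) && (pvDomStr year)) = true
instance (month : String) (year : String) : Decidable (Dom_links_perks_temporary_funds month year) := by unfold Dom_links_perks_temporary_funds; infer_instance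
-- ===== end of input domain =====

-- B replaces A's suffix table and key-scanning loop by one membership test on the
-- twelve month strings plus a closed-form suffix from int(month) (objective: simpler).

-- ===== PORT A =====
def pvBaseUrl : String := "https://www.mpba.mp.br/sites/default/files/biblioteca/portal-transparencia/contracheque/"

def codMeses : List (String × String) :=
  [("01", ""), ("02", "_0"), ("03", "_1"), ("04", "_2"), ("05", "_3"), ("06", "_4"),
   ("07", "_5"), ("08", "_6"), ("09", "_7"), ("10", "_8"), ("11", "_9"), ("12", "_10")]

def links_perks_temporary_funds (month : String) (year : String) : List (String × String) :=
  -- links_type = {}; link = ""; for key in cod_meses: …; return links_type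
  let res := codMeses.foldl
    (fun (st : PySem.Dict String String × String) kv =>
      if kv.1 == month then
        let link :=
          if kv.1 == "01" then
            pvBaseUrl ++ "verbas-indenizatorias-temporarias/" ++ year
              ++ "/verbas_indenizatorias" ++ kv.2 ++ ".ods"
          else
            pvBaseUrl ++ "verbas-indenizatorias-temporarias/" ++ year
              ++ "/verbas_indenizatoria" ++ kv.2 ++ ".ods"
        (st.1.insert "Membros ativos" link, link)
      else st)
    (PySem.Dict.empty, "")
  res.1.items

-- ===== PORT B =====
def pvValidMonths : List String :=
  ["01", "02", "03", "04", "05", "06", "07", "08", "09", "10", "11", "12"]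

def links_perks_temporary_funds_alt (month : String) (year : String) : List (String × String) :=
  if month ∈ pvValidMonths then
    let v := (PySem.Int.ofStr? month).getD 0   -- int(s); guarded by the membership test
    let stem :=
      if v == 1 then "verbas_indenizatorias"
      else "verbas_indenizatoria_" ++ PySem.Int.toStr (v - 2)
    [("Membros ativos",
      pvBaseUrl ++ "verbas-indenizatorias-temporarias/" ++ year ++ "/" ++ stem ++ ".ods")]
  else []

-- ===== PRECONDITION & SPEC =====
def Spec_links_perks_temporary_funds (month : String) (year : String) (out : List (String × String)) : Prop := out = links_perks_temporary_funds_alt month year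
instance (month : String) (year : String) (out : List (String × String)) : Decidable (Spec_links_perks_temporary_funds month year out) := by unfold Spec_links_perks_temporary_funds; infer_instance

-- ===== CLAIM (what is proved, stated in full; the proofs are below) =====
def Claim_equal_links_perks_temporary_funds : Prop := ∀ (month : String) (year : String), Dom_links_perks_temporary_funds month year → Spec_links_perks_temporary_funds month year (links_perks_temporary_funds month year)

-- ===== LEMMAS AND PROOFS =====

-- ===== VERDICT (by name: the statement is the Claim_ definition above) =====
theorem links_perks_temporary_funds_spec : Claim_equal_links_perks_temporary_funds := by
  intro month year _
  show links_perks_temporary_funds month year = links_perks_temporary_funds_alt month year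
  by_cases h1 : month = "01"
  · subst h1
    simp [links_perks_temporary_funds, links_perks_temporary_funds_alt, codMeses, pvValidMonths,
      List.foldl, PySem.Dict.empty, PySem.Dict.insert, String.append_assoc]
    decide
  by_cases h2 : month = "02"
  · subst h2
    simp [links_perks_temporary_funds, links_perks_temporary_funds_alt, codMeses, pvValidMonths,
      List.foldl, PySem.Dict.empty, PySem.Dict.insert, String.append_assoc]
    decide
  by_cases h3 : month = "03"
  · subst h3
    simp [links_perks_temporary_funds, links_perks_temporary_funds_alt, codMeses, pvValidMonths,
      List.foldl, PySem.Dict.empty, PySem.Dict.insert, String.append_assoc]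
    decide
  by_cases h4 : month = "04"
  · subst h4
    simp [links_perks_temporary_funds, links_perks_temporary_funds_alt, codMeses, pvValidMonths,
      List.foldl, PySem.Dict.empty, PySem.Dict.insert, String.append_assoc]
    decide
  by_cases h5 : month = "05"
  · subst h5
    simp [links_perks_temporary_funds, links_perks_temporary_funds_alt, codMeses, pvValidMonths,
      List.foldl, PySem.Dict.empty, PySem.Dict.insert, String.append_assoc]
    decide
  by_cases h6 : month = "06"
  · subst h6
    simp [links_perks_temporary_funds, links_perks_temporary_funds_alt, codMeses, pvValidMonths,
      List.foldl, PySem.Dict.empty, PySem.Dict.insert, String.append_assoc]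
    decide
  by_cases h7 : month = "07"
  · subst h7
    simp [links_perks_temporary_funds, links_perks_temporary_funds_alt, codMeses, pvValidMonths,
      List.foldl, PySem.Dict.empty, PySem.Dict.insert, String.append_assoc]
    decide
  by_cases h8 : month = "08"
  · subst h8
    simp [links_perks_temporary_funds, links_perks_temporary_funds_alt, codMeses, pvValidMonths,
      List.foldl, PySem.Dict.empty, PySem.Dict.insert, String.append_assoc]
    decide
  by_cases h9 : month = "09"
  · subst h9
    simp [links_perks_temporary_funds, links_perks_temporary_funds_alt, codMeses, pvValidMonths,
      List.foldl, PySem.Dict.empty, PySem.Dict.insert, String.append_assoc]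
    decide
  by_cases h10 : month = "10"
  · subst h10
    simp [links_perks_temporary_funds, links_perks_temporary_funds_alt, codMeses, pvValidMonths,
      List.foldl, PySem.Dict.empty, PySem.Dict.insert, String.append_assoc]
    decide
  by_cases h11 : month = "11"
  · subst h11
    simp [links_perks_temporary_funds, links_perks_temporary_funds_alt, codMeses, pvValidMonths,
      List.foldl, PySem.Dict.empty, PySem.Dict.insert, String.append_assoc]
    decide
  by_cases h12 : month = "12"
  · subst h12
    simp [links_perks_temporary_funds, links_perks_temporary_funds_alt, codMeses, pvValidMonths,
      List.foldl, PySem.Dict.empty, PySem.Dict.insert, String.append_assoc]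
    decide
  · simp [links_perks_temporary_funds, links_perks_temporary_funds_alt, codMeses, pvValidMonths,
      List.foldl, PySem.Dict.empty, beq_iff_eq, Ne.symm h1, Ne.symm h2, Ne.symm h3, Ne.symm h4, Ne.symm h5, Ne.symm h6, Ne.symm h7, Ne.symm h8, Ne.symm h9, Ne.symm h10, Ne.symm h11, Ne.symm h12,
      h1, h2, h3, h4, h5, h6, h7, h8, h9, h10, h11, h12]
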